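-- pv_equiv track=rewrite | github.com/instafiore/AMOSUM | test_dp copy.py | get_all_lit_below_you
-- ===== SOURCE A (Python) =====
-- def get_all_lit_below_you(lits, l):
--
--     res = []
--     found = False
--     for i in range(len(lits) - 1, -1, -1):
--         lit = lits[i]
--         if lit == l:
--             found = True
--         if found:
--             res.append(lit)
--
--     return res
-- ===== SOURCE B (Python) =====
-- def get_all_lit_below_you(lits, l):
--     idx = -1
--     for i, lit in enumerate(lits):
--         if lit == l:
--             idx = i
--     if idx == -1:
--         return []
--     return lits[:idx + 1][::-1]
-- ===== Notes on version B (the rewrite author's own statement) =====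
-- stated objective: simpler
-- what changed: Replaces the fused backward find-and-collect loop (index countdown with a found flag and appends) by a locate-then-slice decomposition: a forward scan records the last index of l, then the prefix up to it is sliced and reversed.
import Mathlib
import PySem

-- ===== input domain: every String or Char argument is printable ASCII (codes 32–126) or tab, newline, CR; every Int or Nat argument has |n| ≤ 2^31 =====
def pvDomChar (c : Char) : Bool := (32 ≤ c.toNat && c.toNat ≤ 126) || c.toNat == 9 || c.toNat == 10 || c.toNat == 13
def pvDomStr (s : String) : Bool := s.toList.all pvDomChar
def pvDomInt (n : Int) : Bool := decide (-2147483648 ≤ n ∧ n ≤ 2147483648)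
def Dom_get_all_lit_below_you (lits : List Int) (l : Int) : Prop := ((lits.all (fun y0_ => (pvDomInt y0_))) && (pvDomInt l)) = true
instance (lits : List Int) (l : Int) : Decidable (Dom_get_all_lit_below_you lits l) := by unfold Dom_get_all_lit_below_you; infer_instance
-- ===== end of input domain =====

-- B replaces A's fused backward find-and-collect loop by a simpler locate-then-slice decomposition (forward scan for the last index of l, then reversed prefix).


-- ===== PORT A =====
-- for i in range(len(lits)-1, -1, -1): lit = lits[i]; if lit == l: found = True; if found: res.append(lit)
-- lits[i] is always in range here, so pyGetD with a default is exact.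
-- the loop body: lit = lits[i]; if lit == l: found = True; if found: res.append(lit)
def pvStepA (l : Int) (lits : List Int) (st : List Int × Bool) (i : Int) : List Int × Bool :=
  let lit := PySem.List.pyGetD lits i 0
  let found := if lit = l then true else st.2
  let res := if found then st.1 ++ [lit] else st.1
  (res, found)

def get_all_lit_below_you (lits : List Int) (l : Int) : List Int :=
  ((PySem.List.pyRange ((lits.length : Int) - 1) (-1) (-1)).foldl (pvStepA l lits) ([], false)).1

-- ===== PORT B =====
-- forward scan for the last index of l; then lits[:idx+1][::-1]
def get_all_lit_below_you_alt (lits : List Int) (l : Int) : List Int :=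
  let idx := (PySem.List.enumerate lits 0).foldl
    (fun (idx : Int) (p : Int × Int) => if p.2 = l then p.1 else idx) (-1)
  if idx = -1 then []
  else (PySem.List.slice? (PySem.List.slice lits none (some (idx + 1))) none none (-1)).getD []

-- ===== PRECONDITION & SPEC =====
def Spec_get_all_lit_below_you (lits : List Int) (l : Int) (out : List Int) : Prop := out = get_all_lit_below_you_alt lits l
instance (lits : List Int) (l : Int) (out : List Int) : Decidable (Spec_get_all_lit_below_you lits l out) := by unfold Spec_get_all_lit_below_you; infer_instance

-- ===== CLAIM (what is proved, stated in full; the proofs are below) =====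
def Claim_equal_get_all_lit_below_you : Prop := ∀ (lits : List Int) (l : Int), Dom_get_all_lit_below_you lits l → Spec_get_all_lit_below_you lits l (get_all_lit_below_you lits l)

-- ===== LEMMAS AND PROOFS =====

-- A's loop body seen on the element it indexes.
def pvElem (l : Int) (st : List Int × Bool) (lit : Int) : List Int × Bool :=
  let found := if lit = l then true else st.2
  (if found then st.1 ++ [lit] else st.1, found)

-- A's index countdown is a fold of pvElem over the reversed list.
theorem pvA_elems (lits : List Int) (l : Int) :
    get_all_lit_below_you lits l = ((lits.reverse.foldl (pvElem l) ([], false))).1 := by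
  unfold get_all_lit_below_you
  have h1 : PySem.List.pyRange ((lits.length : Int) - 1) (-1) (-1)
      = (PySem.List.pyRange 0 (lits.length : Int) 1).reverse := by
    rw [PySem.List.pyRange_neg_one_eq_reverse]; norm_num
  have h2 : ∀ (init : List Int × Bool) (idxs : List Int),
      idxs.foldl (pvStepA l lits) init
        = (idxs.map (fun j => PySem.List.pyGetD lits j 0)).foldl (pvElem l) init := by
    intro init idxs
    rw [List.foldl_map]
    rfl
  rw [h1, h2, List.map_reverse, PySem.List.map_pyGetD_pyRange_zero']

-- A's loop once found = true just appends everything.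
theorem pvA_found (l : Int) (ys : List Int) : ∀ (res : List Int),
    (ys.foldl (pvElem l) (res, true)).1 = res ++ ys := by
  induction ys with
  | nil => simp
  | cons y t ih =>
    intro res
    rw [List.foldl_cons]
    have h : pvElem l (res, true) y = (res ++ [y], true) := by simp [pvElem]
    rw [h, ih]
    simp

-- A's loop before the first match: result = res ++ suffix from the first occurrence of l.
theorem pvA_notfound (l : Int) (ys : List Int) : ∀ (res : List Int),
    (ys.foldl (pvElem l) (res, false)).1
      = res ++ ys.drop (ys.findIdx (fun x => x = l)) := by
  induction ys with
  | nil => simp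
  | cons y t ih =>
    intro res
    rw [List.foldl_cons]
    by_cases h : y = l
    · have hs : pvElem l (res, false) y = (res ++ [y], true) := by simp [pvElem, h]
      rw [hs, pvA_found]
      simp [List.findIdx_cons, h]
    · have hs : pvElem l (res, false) y = (res, false) := by simp [pvElem, h]
      rw [hs, ih]
      simp [List.findIdx_cons, h]

-- B's forward fold computes the last index of l (as n - 1 - first index in the reverse), or keeps init.
theorem pvB_idx (l : Int) (lits : List Int) : ∀ (s init : Int),
    ((PySem.List.enumerate lits s).foldl
      (fun (idx : Int) (p : Int × Int) => if p.2 = l then p.1 else idx) init)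
    = if l ∈ lits then s + ((lits.length : Int) - 1 - (lits.reverse.findIdx (fun x => x = l) : Int)) else init := by
  induction lits with
  | nil => simp
  | cons x t ih =>
    intro s init
    rw [PySem.List.enumerate_cons]
    rw [List.foldl_cons]
    by_cases hxt : l ∈ t
    · have hj : t.reverse.findIdx (fun x => x = l) < t.reverse.length :=
        List.findIdx_lt_length_of_exists ⟨l, by simpa using hxt, by simp⟩
      have hfa : (t.reverse ++ [x]).findIdx (fun x => x = l)
          = t.reverse.findIdx (fun x => x = l) := by
        rw [List.findIdx_append, if_pos hj]
      have hjn : t.reverse.findIdx (fun x => x = l) < t.length := by simpa using hj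
      rw [ih]
      rw [if_pos hxt, if_pos (List.mem_cons_of_mem x hxt)]
      rw [List.reverse_cons, hfa]
      simp only [List.length_cons]
      push_cast
      ring
    · have hnr : t.reverse.findIdx (fun x => x = l) = t.reverse.length := by
        rw [List.findIdx_eq_length]
        intro y hy
        have hne : y ≠ l := fun h => hxt (h ▸ (by simpa using hy))
        simp [hne]
      by_cases hx : x = l
      · subst hx
        have hfa : (t.reverse ++ [x]).findIdx (fun y => y = x) = t.reverse.length := by
          rw [List.findIdx_append, if_neg (by omega)]
          simp
        rw [if_pos rfl, ih, if_neg hxt]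
        rw [if_pos (List.mem_cons_self), List.reverse_cons, hfa]
        simp only [List.length_cons, List.length_reverse]
        push_cast
        ring
      · have hmem : l ∉ x :: t := by
          simp only [List.mem_cons]
          rintro (h | h); exact hx h.symm; exact hxt h
        rw [if_neg (fun h => hx h), ih, if_neg hxt, if_neg hmem]

-- ===== VERDICT (by name: the statement is the Claim_ definition above) =====
theorem get_all_lit_below_you_spec : Claim_equal_get_all_lit_below_you := by
  intro lits l _
  unfold Spec_get_all_lit_below_you get_all_lit_below_you_alt
  rw [pvB_idx]
  rw [pvA_elems, pvA_notfound]
  by_cases hm : l ∈ lits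
  · set n := lits.length with hn
    set j := lits.reverse.findIdx (fun x => x = l) with hj
    have hjn : j < n := by
      have : j < lits.reverse.length :=
        List.findIdx_lt_length_of_exists ⟨l, by simpa using hm, by simp⟩
      simpa using this
    have hidx : (0 : Int) + ((n : Int) - 1 - (j : Int)) ≠ -1 := by omega
    rw [if_pos hm, if_neg hidx]
    have hb : (0 : Int) + ((n : Int) - 1 - (j : Int)) + 1 = ((n - j : Nat) : Int) := by
      push_cast [Nat.cast_sub (le_of_lt hjn)]; ring
    rw [hb, PySem.List.slice_to_natCast, PySem.List.slice?_none_none_neg_one]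
    simp only [Option.getD_some]
    rw [List.drop_reverse]
    simp [hn]
  · have hnr : lits.reverse.findIdx (fun x => x = l) = lits.reverse.length := by
      rw [List.findIdx_eq_length]
      intro y hy
      have hne : y ≠ l := fun h => hm (h ▸ (by simpa using hy))
      simp [hne]
    rw [if_neg hm, if_pos rfl, hnr]
    simp
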